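/-
  THE INSTANCE OF THE CONTRACT VOCABULARY FOR THE BASE-IMAGE PLATFORM: every name of ProgX/Spec/Basic.lean at the text record
  `ProgX.Base.T` (`[100000H, 140000H)`, report 100059H: ProgX/Base/Text.lean), as an ABBREVIATION: `Base.WayInv`, `Base.CodeOK u₀`,
  `Base.conv u₀`, `Base.LiveIn`, `Base.ShadowPre`. A hypothesis stated with a name of this file fits a generic lemma and back, and
  dot notation (`hsh.inv`, `hsh.rsp`, `hl.sub`) works. The lemmas whose statement shows the text window (`conv_code_eqOn`,
  `LiveIn.where_`, `LiveIn.offText`) are restated here with the window's numbers (`L.textLo`, `L.textHi`, `0x140000`), as `u_omega`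
  and `omega` want them. The tactics `v_side v_entry v_inv v_returned v_untouched v_after_call` are those of ProgX/Spec/Basic.lean.

  WHO USES THESE NAMES: the statements and proofs of the base's own functions (ProgX/Base/Units, ProgX/Base/Proved) and of EVERY
  program linked against the base image (`<Prog>/Spec/Units/*.lean`): `Calls Lay μ ProgX.Base.WayInv (ProgX.Base.conv u₀) …`.
  THE SAME LAYER EXISTS FOR stb_vorbis (`Vorbis.WayInv` … at `Vorbis.text`, proofs.vorbis/Vorbis/Spec/Basic.lean after its migration):
  this file was made from that one by out/mk_base_instance.py (`Vorbis` -> `ProgX.Base`, `text` -> `T`, 0x119d40 -> 0x140000), so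
  that an accepted stb_vorbis proof of a base function becomes a proof of the base's statement by the same renaming.
-/
import ProgX.Spec.Basic
import ProgX.StartShadow
import ProgX.Base.Text
import ProgX.Base.Code
import ProgX.Base.Dec.All
import ProgX.Base.Symbols
import ProgX.Base.Frames
import Asan.Runtime
import Asan.Check
import Asan.CheckWalk
import UserX.SseStep
import UserX.Loop
import UserX.Call
import UserX.CallAt
import UserX.FrameTac
namespace ProgX.Base
open X86 X86.User Asan

/-! ### The invariant of the way, the code, the convention -/

/-- **The invariant of the way** of every contract of the proof: the machine is not at `__asan_report`, and RIP is inside the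
text of the image. `u_walk` discharges it at every step by evaluation (RIP is a numeral there). This is `ProgX.WayInv T`
(`wayInv_eq`); the body is written out because the walker unfolds the NAME of the invariant once, and must find `v.rip` then. -/
abbrev WayInv : State → Prop :=
  fun v => v.rip ≠ T.report ∧ T.lo ≤ v.rip.toNat ∧ v.rip.toNat < T.hi

/-- The invariant of the way is the generic one, at the text record of stb_vorbis. -/
theorem wayInv_eq : WayInv = ProgX.WayInv T := rfl

/-- `WayInv` is the invariant `ProgX.StaysInCode.of_reachVia` asks for, for every image linked for the base's text record. -/
theorem wayInv_iff {im : Image} (h : T.Of im) (v : State) :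
    WayInv v ↔ (v.rip ≠ im.report ∧ InText im v.rip) :=
  ProgX.wayInv_iff h v

/-- **The image's text is unchanged**: the memory `m` agrees with the memory of the reference state `u₀` on the text. -/
abbrev CodeOK (u₀ : State) : Mem → Prop :=
  ProgX.CodeOK T u₀

/-- **The calling convention of the program**: the code is the text as it is in the reference state `u₀`, the stack region is
`[700000H, 800000H)`, the invariant of every function boundary is the ABI's (DF = 0, SSE exceptions masked). -/
abbrev conv (u₀ : State) : Conv :=
  ProgX.conv T u₀

/-- The convention's stack region starts at 700000H. -/
theorem conv_stackLo (u₀ : State) : (conv u₀).stackLo = 0x700000 := ProgX.conv_stackLo T u₀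

/-- The convention's stack region ends at 800000H. -/
theorem conv_stackHi (u₀ : State) : (conv u₀).stackHi = 0x800000 := ProgX.conv_stackHi T u₀

/-- The convention's invariant of a function boundary is the ABI's. -/
theorem conv_inv (u₀ : State) : (conv u₀).inv = abiInv := ProgX.conv_inv T u₀

/-- The convention's code is in `m` exactly when the text of `m` is that of the reference state. -/
theorem conv_code_iff (u₀ : State) (m : Mem) : (conv u₀).code.In m ↔ CodeOK u₀ m :=
  ProgX.conv_code_iff T u₀ m

/-- The `code` field of a callee's `AtEntry` / of the function's own `Returned`, from the walker's `w_eq`. -/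
theorem conv_code_in {u₀ : State} {m : Mem} (h : Mem.EqOn L.textLo L.textHi u₀.mem m) : (conv u₀).code.In m :=
  ProgX.conv_code_in (T := T) h

/-- The walker's span fact at the function's entry, from `AtEntry.code`. -/
theorem conv_code_eqOn {u₀ : State} {m : Mem} (h : (conv u₀).code.In m) : Mem.EqOn L.textLo L.textHi u₀.mem m :=
  ProgX.conv_code_eqOn (T := T) h

export ProgX (sseOK_of_abiInv abiInv_of)

/-! ### Live objects; the shadow clause of an unprotected function -/

/-- **`Live(a, n)`** of the design documents: the `n` bytes at `a` lie inside ONE live object — a stack object of an active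
protected frame, or one of `others` (globals, input, output, arena blocks). -/
abbrev LiveIn (others : List Obj) (frames : List (Nat × FrameLayout)) (a n : Nat) : Prop :=
  ProgX.LiveIn others frames a n

/-- **The shadow clause of a contract's precondition**: the shadow layer holds at the entry state, with the clean stack ending
at the caller's stack pointer (`rsp + 8`: the slot of the return address is part of the clean region) (`.inv`); and no live object
lies in the image's text (`.offText`), so that a checked store never touches the code. -/
abbrev ShadowPre (others : List Obj) (frames : List (Nat × FrameLayout)) (u : State) : Prop :=
  ProgX.ShadowPre T others frames u

/-! The lemmas of `ProgX.LiveIn` and `ProgX.ShadowPre`, restated for the abbreviations: dot notation on a hypothesis stated with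
`ProgX.Base.LiveIn` / `ProgX.Base.ShadowPre` looks in THIS namespace first, and an alias of a generic lemma would not do there (its argument
is a `ProgX.LiveIn`, which Lean does not take for the dotted hypothesis). A hypothesis that comes out of a generic contract
(`ProgX.LiveIn …`, `ProgX.ShadowPre T …`) finds the generic lemma directly. -/

namespace LiveIn
variable {others : List Obj} {frames : List (Nat × FrameLayout)} {top a n : Nat} {mem : Mem}

/-- A sub-range of a live range. -/
theorem sub (h : LiveIn others frames a n) (b k : Nat) (h1 : a ≤ b) (h2 : b + k ≤ a + n) : LiveIn others frames b k :=
  ProgX.LiveIn.sub h b k h1 h2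

/-- A live range lies in the data space `[100000H, C00000H)`. -/
theorem inside (h : LiveIn others frames a n) (hinv : ShadowInv others frames top mem) (hn : 0 < n) :
    0x100000 ≤ a ∧ a + n ≤ 0xC00000 :=
  ProgX.LiveIn.inside h hinv hn

/-- **A live range does not meet the stack below `top`** (the function's own frame and everything it pushes): a stack object
lies in an active frame, at or above `top`; every other object is off the stack region. -/
theorem above (h : LiveIn others frames a n) (hinv : ShadowInv others frames top mem) :
    top ≤ a ∨ a + n ≤ 0x700000 ∨ 0x800000 ≤ a :=
  ProgX.LiveIn.above h hinv

/-- **A live range does not meet the image's text.** -/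
theorem offText (h : LiveIn others frames a n) (hinv : ShadowInv others frames top mem)
    (hoff : ∀ o, o ∈ others → L.textHi ≤ o.base) : L.textHi ≤ a :=
  ProgX.LiveIn.offText (T := T) h hinv hoff

/-- **Everything a walk needs to know about where a live range is**, as one arithmetic fact for `u_omega`: inside the data
space, off the image's text, off the stack below `top`. (`n = 0`: nothing is known, nothing is accessed.) The generic
`ProgX.LiveIn.where_` with the end of the text window as a numeral. -/
theorem where_ (h : LiveIn others frames a n) (hinv : ShadowInv others frames top mem)
    (hoff : ∀ o, o ∈ others → L.textHi ≤ o.base) (hn : 0 < n) :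
    0x140000 ≤ a ∧ a + n ≤ 0xC00000 ∧ (top ≤ a ∨ a + n ≤ 0x700000 ∨ 0x800000 ≤ a) :=
  ProgX.LiveIn.where_ (T := T) h hinv hoff hn

/-- The small check of bytes inside a live range passes, in any memory whose shadow is that of the invariant's. -/
theorem accSmall (h : LiveIn others frames a n) (hinv : ShadowInv others frames top mem) {mem' : Mem}
    (hun : ShadowUntouched mem mem') (b : Word) (k : Nat) (hk : 1 ≤ k) (h1 : a ≤ b.toNat) (h2 : b.toNat + k ≤ a + n) :
    AccSmall k mem' b :=
  ProgX.LiveIn.accSmall h hinv hun b k hk h1 h2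

end LiveIn

/-- **The shadow clause of the postcondition of an unprotected function** (SH8, `ShadowUntouched`) gives the layer back at the
returned state: same objects, same frames, the clean stack ends at the caller's stack pointer again. -/
theorem ShadowPre.post {others : List Obj} {frames : List (Nat × FrameLayout)} {u v : State}
    (h : ShadowPre others frames u) (hun : ShadowUntouched u.mem v.mem) (hrsp : v.reg .rsp = u.reg .rsp + 8) :
    ShadowInv others frames (v.reg .rsp).toNat v.mem :=
  ProgX.ShadowPre.post h hun hrsp

/-- The stack pointer of a state with the shadow clause is a stack address: `700000H ≤ rsp + 8 ≤ 800000H`, 8-aligned. -/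
theorem ShadowPre.rsp {others : List Obj} {frames : List (Nat × FrameLayout)} {u : State} (h : ShadowPre others frames u) :
    0x700000 ≤ (u.reg .rsp).toNat + 8 ∧ (u.reg .rsp).toNat + 8 ≤ 0x800000 ∧ ((u.reg .rsp).toNat + 8) % 8 = 0 :=
  ProgX.ShadowPre.rsp h

/-- **The shadow clause at a callee's entry, from the caller's own** (the `pre_<addr>` goal of a call of an unprotected function
by an unprotected function): the callee is entered with a lower stack pointer — still 8-aligned and inside the stack region —
and no store of the caller so far went to the shadow (`by v_untouched`). -/
theorem ShadowPre.callee {others : List Obj} {frames : List (Nat × FrameLayout)} {u v : State}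
    (h : ShadowPre others frames u) (hun : ShadowUntouched u.mem v.mem)
    (hle : (v.reg .rsp).toNat ≤ (u.reg .rsp).toNat) (h8 : (v.reg .rsp).toNat % 8 = 0)
    (hlo : 0x700000 ≤ (v.reg .rsp).toNat + 8) : ShadowPre others frames v :=
  ProgX.ShadowPre.callee h hun hle h8 hlo

export ProgX (check_small check_small_other byte_of_part32 readLE_stored_byte32 toNat_ofBV32 toNat_part32 stack_has
  startLayout_lo)

/-! The objects every run starts with (ProgX/StartShadow.lean), under the platform's names: a program's stub proof and its
`prog_main` contract name them, and a proof opens `ProgX.Base` only (`open ProgX ProgX.Base` makes `LiveIn` ambiguous at the root). -/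
export ProgX (initialObjs objIN objOUT)

end ProgX.Base
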